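-- pv_equiv track=rewrite | github.com/Muzzh/Codefights | TheCore/MirrorLake/NumberOfClans.py | numberOfClans
-- ===== SOURCE A (Python) =====
-- def numberOfClans(divisors, k):
--     clans = set()
--
--     for i in range(1, k+1):
--         dividable = []
--         for j in range(len(divisors)):
--             if i%divisors[j] == 0:
--                 dividable.append(divisors[j])
--         dividable = tuple(dividable)
--         clans.add(dividable)
--
--     return len(clans)
-- ===== SOURCE B (Python) =====
-- def numberOfClans(divisors, k):
--     # The divisibility pattern of i is periodic in i with period L = lcm of the
--     # nonzero |d|, so distinct patterns over 1..k equal those over 1..min(k, L).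
--     # The lcm pass stops updating once L exceeds k (min(k, L) is k then anyway),
--     # which keeps the integers small.  Divisors with |d| > min(k, L) divide no
--     # scanned i, so they are dropped up front.
--     L = 1
--     for d in divisors:
--         if d and L <= k:
--             a, b = L, abs(d)
--             while b:
--                 a, b = b, a % b
--             L = (L * abs(d)) // a
--     limit = k if k < L else L
--     candidates = [d for d in divisors if abs(d) <= limit]
--     patterns = set()
--     for i in range(1, limit + 1):
--         patterns.add(tuple(d for d in candidates if i % d == 0))
--     return len(patterns)
-- ===== Notes on version B (the rewrite author's own statement) =====
-- stated objective: alternative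
-- what changed: B computes L = lcm of the nonzero |d| (capping the pass once L exceeds k) and scans only i = 1..min(k, L) instead of 1..k, exploiting periodicity of the divisibility pattern, after dropping divisors with |d| > min(k, L); intended as faster when L < k (a timing run measured large speedups at the sizes both finish but could not confirm it on every large input), stated here as an alternative algorithm.
import Mathlib
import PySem

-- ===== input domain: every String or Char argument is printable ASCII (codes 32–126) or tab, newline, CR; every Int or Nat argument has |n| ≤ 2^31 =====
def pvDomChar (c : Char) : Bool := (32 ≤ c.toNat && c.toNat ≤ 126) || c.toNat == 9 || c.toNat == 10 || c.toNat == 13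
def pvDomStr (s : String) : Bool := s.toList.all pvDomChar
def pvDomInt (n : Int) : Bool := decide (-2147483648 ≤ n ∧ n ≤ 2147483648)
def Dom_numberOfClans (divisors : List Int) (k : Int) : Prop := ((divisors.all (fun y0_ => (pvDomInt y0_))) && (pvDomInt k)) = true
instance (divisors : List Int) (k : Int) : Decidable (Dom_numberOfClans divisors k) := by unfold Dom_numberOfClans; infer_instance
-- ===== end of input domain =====

-- B exploits that the divisibility pattern of i is periodic with period L = lcm of the
-- nonzero |d|, so it scans only 1..min(k, L) instead of 1..k (the lcm pass stops updating
-- once L exceeds k, since min(k, L) is k then anyway), and drops divisors with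
-- |d| > min(k, L) up front since they divide no scanned i (different algorithm).

-- ===== PORT A =====
def numberOfClans (divisors : List Int) (k : Int) : Int :=
  let clans : PySem.Set (List Int) :=
    (PySem.List.pyRange 1 (k + 1)).foldl (fun clans i =>
      let dividable : List Int :=
        (PySem.List.pyRange 0 (PySem.List.len divisors)).foldl (fun acc j =>
          if PySem.Int.mod i (PySem.List.pyGetD divisors j 0) == 0
          then acc ++ [PySem.List.pyGetD divisors j 0] else acc) []
      clans.add dividable) PySem.Set.empty
  PySem.Set.len clans

-- ===== PORT B =====
-- the 'while b: a, b = b, a % b' Euclid loop of Source B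
def gcdLoopB (a b : Int) : Int :=
  if h : b = 0 then a else gcdLoopB b (PySem.Int.mod a b)
termination_by b.natAbs
decreasing_by
  rcases lt_or_gt_of_ne h with hb | hb
  · have h1 := PySem.Int.mod_neg_bounds a hb
    omega
  · have h1 := PySem.Int.mod_nonneg a hb
    have h2 := PySem.Int.mod_lt a hb
    omega

def numberOfClans_alt (divisors : List Int) (k : Int) : Int :=
  let L : Int := divisors.foldl (fun L d =>
    if d ≠ 0 ∧ L ≤ k then PySem.Int.floordiv (L * |d|) (gcdLoopB L |d|) else L) 1
  let limit : Int := if k < L then k else L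
  let candidates : List Int := divisors.filter (fun d => decide (|d| ≤ limit))
  let patterns : PySem.Set (List Int) :=
    (PySem.List.pyRange 1 (limit + 1)).foldl (fun s i =>
      s.add (candidates.filter (fun d => PySem.Int.mod i d == 0))) PySem.Set.empty
  PySem.Set.len patterns

-- ===== PRECONDITION & SPEC =====
-- Pre_ excludes exactly the inputs on which A raises ZeroDivisionError:
-- 0 ∈ divisors with k ≥ 1 (the inner loop then computes i % 0).
def Pre_numberOfClans (divisors : List Int) (k : Int) : Prop :=
  0 < k → (0 : Int) ∉ divisors
instance (divisors : List Int) (k : Int) : Decidable (Pre_numberOfClans divisors k) := by unfold Pre_numberOfClans; infer_instance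
def pvWitness_numberOfClans : List Int × Int := ([2, 3, -4], 25)
def Spec_numberOfClans (divisors : List Int) (k : Int) (out : Int) : Prop := out = numberOfClans_alt divisors k
instance (divisors : List Int) (k : Int) (out : Int) : Decidable (Spec_numberOfClans divisors k out) := by unfold Spec_numberOfClans; infer_instance

-- ===== CLAIM (what is proved, stated in full; the proofs are below) =====
def Claim_equal_numberOfClans : Prop := ∀ (divisors : List Int) (k : Int), Dom_numberOfClans divisors k → Pre_numberOfClans divisors k → Spec_numberOfClans divisors k (numberOfClans divisors k)

-- ===== LEMMAS AND PROOFS =====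

-- the divisibility pattern of i (what A's inner loop and B's filter both compute)
def pvPat (divisors : List Int) (i : Int) : List Int :=
  divisors.filter (fun d => PySem.Int.mod i d == 0)

-- B's lcm accumulator, named for the proofs
def pvLcm (divisors : List Int) (k : Int) : Int :=
  divisors.foldl (fun L d =>
    if d ≠ 0 ∧ L ≤ k then PySem.Int.floordiv (L * |d|) (gcdLoopB L |d|) else L) 1

lemma gcdLoopB_eq_gcd_aux : ∀ (n : Nat) (a b : Int), b.natAbs < n → 0 ≤ a → 0 ≤ b →
    gcdLoopB a b = (Int.gcd a b : Int) := by
  intro n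
  induction n with
  | zero => intro a b hn _ _; omega
  | succ n ih =>
    intro a b hn ha hb
    rw [gcdLoopB]
    split
    · rename_i h; subst h; rw [Int.gcd_zero_right]; omega
    · rename_i h
      have hbpos : 0 < b := lt_of_le_of_ne hb (Ne.symm h)
      rw [PySem.Int.mod_eq_emod_of_pos hbpos]
      have h1 : 0 ≤ a % b := Int.emod_nonneg a (by omega)
      have h2 : a % b < b := Int.emod_lt_of_pos a hbpos
      rw [ih b (a % b) (by omega) hb h1]
      congr 1
      rw [Int.emod_def, Int.gcd_comm a b, mul_comm b (a / b)]
      exact Int.gcd_sub_mul_right_right b a (a / b)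

lemma gcdLoopB_eq_gcd (a b : Int) (ha : 0 ≤ a) (hb : 0 ≤ b) :
    gcdLoopB a b = (Int.gcd a b : Int) :=
  gcdLoopB_eq_gcd_aux (b.natAbs + 1) a b (by omega) ha hb

-- invariant of B's capped lcm fold: positive, the start divides the result, and if the
-- result stayed ≤ k then every nonzero divisor divides it
lemma pvLcm_fold_spec : ∀ (ds : List Int) (L k : Int), 0 < L →
    0 < ds.foldl (fun L d =>
        if d ≠ 0 ∧ L ≤ k then PySem.Int.floordiv (L * |d|) (gcdLoopB L |d|) else L) L ∧
    L ∣ ds.foldl (fun L d =>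
        if d ≠ 0 ∧ L ≤ k then PySem.Int.floordiv (L * |d|) (gcdLoopB L |d|) else L) L ∧
    (ds.foldl (fun L d =>
        if d ≠ 0 ∧ L ≤ k then PySem.Int.floordiv (L * |d|) (gcdLoopB L |d|) else L) L ≤ k →
      ∀ d ∈ ds, d ≠ 0 → d ∣ ds.foldl (fun L d =>
        if d ≠ 0 ∧ L ≤ k then PySem.Int.floordiv (L * |d|) (gcdLoopB L |d|) else L) L) := by
  intro ds
  induction ds with
  | nil => intro L k hL; exact ⟨hL, dvd_refl L, by simp⟩
  | cons d ds ih =>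
    intro L k hL
    by_cases hc : d ≠ 0 ∧ L ≤ k
    · have hd0 : d ≠ 0 := hc.1
      have habs : (0:Int) < |d| := abs_pos.mpr hd0
      have hg : gcdLoopB L |d| = (Int.gcd L |d| : Int) :=
        gcdLoopB_eq_gcd L |d| (by omega) (by omega)
      have hgpos : (0:Int) < (Int.gcd L |d| : Int) := by
        have : 0 < Int.gcd L |d| := Int.gcd_pos_iff.mpr (Or.inl (by omega))
        exact_mod_cast this
      obtain ⟨t, ht⟩ := Int.gcd_dvd_right L |d|
      have hL1 : PySem.Int.floordiv (L * |d|) (gcdLoopB L |d|) = L * t := by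
        have hmul : L * |d| = (Int.gcd L |d| : Int) * (L * t) := by linear_combination L * ht
        rw [hg, PySem.Int.floordiv_eq_ediv_of_pos hgpos, hmul,
          Int.mul_ediv_cancel_left _ (by omega)]
      have htpos : 0 < t := by
        by_contra hcon
        push_neg at hcon
        nlinarith
      have hL1pos : 0 < L * t := by positivity
      have hddvd : d ∣ L * t := by
        obtain ⟨s, hs⟩ := Int.gcd_dvd_left L |d|
        have habsdvd : |d| ∣ L * t := ⟨s, by linear_combination t * hs - s * ht⟩
        exact (abs_dvd d (L * t)).mp habsdvd
      simp only [List.foldl_cons, if_pos hc, hL1]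
      obtain ⟨h1, h2, h3⟩ := ih (L * t) k hL1pos
      refine ⟨h1, dvd_trans (Dvd.intro t rfl) h2, ?_⟩
      intro hle x hx hxne
      rcases List.mem_cons.mp hx with h | h
      · subst h; exact dvd_trans hddvd h2
      · exact h3 hle x h hxne
    · simp only [List.foldl_cons, if_neg hc]
      obtain ⟨h1, h2, h3⟩ := ih L k hL
      refine ⟨h1, h2, ?_⟩
      intro hle x hx hxne
      rcases List.mem_cons.mp hx with h | h
      · subst h
        -- guard failed with x ≠ 0, so k < L; but L ∣ result ≤ k, contradiction
        exfalso
        have hkL : k < L := by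
          by_contra hk
          exact hc ⟨hxne, by omega⟩
        have := Int.le_of_dvd h1 h2
        omega
      · exact h3 hle x h hxne

lemma pvLcm_spec (divisors : List Int) (k : Int) :
    0 < pvLcm divisors k ∧ (pvLcm divisors k ≤ k →
      ∀ d ∈ divisors, d ≠ 0 → d ∣ pvLcm divisors k) := by
  obtain ⟨h1, _, h3⟩ := pvLcm_fold_spec divisors 1 k one_pos
  exact ⟨h1, h3⟩

-- periodicity: the pattern depends on i only modulo any common multiple L
lemma pvPat_congr (divisors : List Int) (L i j : Int)
    (hdvd : ∀ d ∈ divisors, d ∣ L) (hij : L ∣ i - j) :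
    pvPat divisors i = pvPat divisors j := by
  unfold pvPat
  apply List.filter_congr
  intro d hd
  have hdL : d ∣ i - j := dvd_trans (hdvd d hd) hij
  have hiff : d ∣ i ↔ d ∣ j :=
    ⟨fun h => by simpa using dvd_sub h hdL, fun h => by simpa using dvd_add h hdL⟩
  rw [Bool.eq_iff_iff]
  simp only [beq_iff_eq, PySem.Int.mod_eq_zero_iff_dvd]
  exact hiff

-- distinct-count of a Python set depends only on the membership of the inserted list
lemma pvLen_ofList_congr {α : Type} [BEq α] [LawfulBEq α] (xs ys : List α)
    (h : ∀ a, a ∈ xs ↔ a ∈ ys) :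
    (PySem.Set.ofList xs).length = (PySem.Set.ofList ys).length := by
  refine List.Perm.length_eq ?_
  refine (List.perm_ext_iff_of_nodup (PySem.Set.nodup_ofList xs) (PySem.Set.nodup_ofList ys)).mpr ?_
  intro a
  rw [PySem.Set.mem_ofList, PySem.Set.mem_ofList]
  exact h a

-- A's value as an ofList of patterns
lemma numberOfClans_eq_ofList (divisors : List Int) (k : Int) :
    numberOfClans divisors k =
      ((PySem.Set.ofList ((PySem.List.pyRange 1 (k + 1)).map (pvPat divisors))).length : Int) := by
  unfold numberOfClans
  rw [PySem.Set.len_eq]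
  congr 1
  have hinner : ∀ i : Int,
      (PySem.List.pyRange 0 (PySem.List.len divisors)).foldl (fun acc j =>
        if PySem.Int.mod i (PySem.List.pyGetD divisors j 0) == 0
        then acc ++ [PySem.List.pyGetD divisors j 0] else acc) [] = pvPat divisors i := by
    intro i
    have hmap := PySem.List.map_pyGetD_pyRange_zero divisors (0 : Int)
    calc (PySem.List.pyRange 0 (PySem.List.len divisors)).foldl (fun acc j =>
            if PySem.Int.mod i (PySem.List.pyGetD divisors j 0) == 0
            then acc ++ [PySem.List.pyGetD divisors j 0] else acc) []
        = (((PySem.List.pyRange 0 (PySem.List.len divisors)).map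
              (fun j => PySem.List.pyGetD divisors j 0)).foldl (fun acc d =>
            if PySem.Int.mod i d == 0 then acc ++ [d] else acc) []) := by
          rw [List.foldl_map]
      _ = divisors.foldl (fun acc d => if PySem.Int.mod i d == 0 then acc ++ [d] else acc) [] := by
          rw [hmap]
      _ = pvPat divisors i := by
          simpa [pvPat] using
            PySem.List.foldl_append_if (fun d => PySem.Int.mod i d == 0) id divisors []
  simp only [hinner]
  unfold PySem.Set.ofList
  rw [List.foldl_map]

-- dropping the out-of-range candidates keeps the pattern of every scanned i
lemma pvPat_candidates (divisors : List Int) (limit i : Int) (h1 : 1 ≤ i) (h2 : i ≤ limit) :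
    (divisors.filter (fun d => decide (|d| ≤ limit))).filter (fun d => PySem.Int.mod i d == 0)
      = pvPat divisors i := by
  rw [List.filter_filter]
  unfold pvPat
  apply List.filter_congr
  intro d _
  by_cases hp : PySem.Int.mod i d = 0
  · have hdvd : d ∣ i := (PySem.Int.mod_eq_zero_iff_dvd i d).mp hp
    have hd0 : d ≠ 0 := by
      rintro rfl
      have : i = 0 := by simpa using hdvd
      omega
    have habs : |d| ≤ i := Int.le_of_dvd (by omega) ((abs_dvd d i).mpr hdvd)
    simp [hp, show |d| ≤ limit by omega]
  · simp [hp]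

-- B's value as an ofList of patterns over the reduced range
lemma numberOfClans_alt_eq_ofList (divisors : List Int) (k : Int) :
    numberOfClans_alt divisors k =
      ((PySem.Set.ofList ((PySem.List.pyRange 1
          ((if k < pvLcm divisors k then k else pvLcm divisors k) + 1)).map (pvPat divisors))).length : Int) := by
  unfold numberOfClans_alt
  rw [PySem.Set.len_eq]
  congr 1
  rw [show divisors.foldl (fun L d =>
      if d ≠ 0 ∧ L ≤ k then PySem.Int.floordiv (L * |d|) (gcdLoopB L |d|) else L) 1
      = pvLcm divisors k from rfl]
  have hmap : (PySem.List.pyRange 1 ((if k < pvLcm divisors k then k else pvLcm divisors k) + 1)).map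
      (fun i => (divisors.filter
        (fun d => decide (|d| ≤ if k < pvLcm divisors k then k else pvLcm divisors k))).filter
        (fun d => PySem.Int.mod i d == 0))
      = (PySem.List.pyRange 1 ((if k < pvLcm divisors k then k else pvLcm divisors k) + 1)).map
        (pvPat divisors) := by
    apply List.map_congr_left
    intro i hi
    rw [PySem.List.mem_pyRange_one] at hi
    exact pvPat_candidates divisors _ i hi.1 (by omega)
  rw [← hmap]
  unfold PySem.Set.ofList
  rw [List.foldl_map]

-- the two ranges produce the same set of patterns
lemma pvMem_iff (divisors : List Int) (k : Int) (hz : ∀ d ∈ divisors, d ≠ 0) (a : List Int) :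
    a ∈ (PySem.List.pyRange 1 (k + 1)).map (pvPat divisors) ↔
    a ∈ (PySem.List.pyRange 1
        ((if k < pvLcm divisors k then k else pvLcm divisors k) + 1)).map (pvPat divisors) := by
  obtain ⟨hLpos, hLdvd'⟩ := pvLcm_spec divisors k
  set L := pvLcm divisors k with hLdef
  by_cases hk : k < L
  · simp [hk]
  · push_neg at hk
    have hLdvd : ∀ d ∈ divisors, d ∣ L := fun d hd => hLdvd' hk d hd (hz d hd)
    simp only [if_neg (not_lt.mpr hk), List.mem_map]
    constructor
    · rintro ⟨i, hi, rfl⟩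
      rw [PySem.List.mem_pyRange_one] at hi
      refine ⟨PySem.Int.mod (i - 1) L + 1, ?_, ?_⟩
      · rw [PySem.List.mem_pyRange_one]
        have h1 := PySem.Int.mod_nonneg (i - 1) hLpos
        have h2 := PySem.Int.mod_lt (i - 1) hLpos
        omega
      · refine pvPat_congr divisors L _ i hLdvd ?_
        have := PySem.Int.floordiv_mul_add_mod (i - 1) L
        exact ⟨-(PySem.Int.floordiv (i - 1) L), by linarith [this]⟩
    · rintro ⟨j, hj, rfl⟩
      rw [PySem.List.mem_pyRange_one] at hj
      exact ⟨j, PySem.List.mem_pyRange_one.mpr ⟨hj.1, by omega⟩, rfl⟩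

-- ===== VERDICT (by name: the statement is the Claim_ definition above) =====
theorem numberOfClans_spec : Claim_equal_numberOfClans := by
  intro divisors k _ hpre
  unfold Spec_numberOfClans
  rw [numberOfClans_eq_ofList, numberOfClans_alt_eq_ofList]
  by_cases hk : 0 < k
  · have hz : ∀ d ∈ divisors, d ≠ 0 := by
      intro d hd hd0; exact hpre hk (hd0 ▸ hd)
    exact_mod_cast pvLen_ofList_congr _ _ (pvMem_iff divisors k hz)
  · -- k ≤ 0: both scanned ranges are empty
    have hlim : (if k < pvLcm divisors k then k else pvLcm divisors k) ≤ k := by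
      split <;> omega
    have hiff : ∀ a : List Int,
        a ∈ (PySem.List.pyRange 1 (k + 1)).map (pvPat divisors) ↔
        a ∈ (PySem.List.pyRange 1
            ((if k < pvLcm divisors k then k else pvLcm divisors k) + 1)).map (pvPat divisors) := by
      intro a
      simp only [List.mem_map, PySem.List.mem_pyRange_one]
      constructor
      · rintro ⟨i, hi, -⟩; omega
      · rintro ⟨i, hi, -⟩; omega
    exact_mod_cast pvLen_ofList_congr _ _ hiff
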